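-- pv_equiv track=rewrite | github.com/ofrimasad/qa_translate | src/metrics/squad/evaluate_extended.py | str_intersection_size
-- ===== SOURCE A (Python) =====
-- def str_intersection_size(a: str, b: str):
--     if len(a) > len(b):
--         small = b
--         big = a
--     else:
--         small = a
--         big = b
--
--     if small in big:
--         return len(small)
--
--     for span in range(len(small), len(small) // 2, -1):
--         if small[:span] == big[-span:]:
--             return span
--         if small[-span:] == big[:span]:
--             return span
--
--     return 0
-- ===== SOURCE B (Python) =====
-- def _pf_last(s):
--     # last value of the KMP prefix function of s (longest proper border of s)
--     n = len(s)
--     if n == 0: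
--         return 0
--     pi = [0]
--     for i in range(1, n):
--         k = pi[i - 1]
--         while k > 0 and s[i] != s[k]:
--             k = pi[k - 1]
--         if s[i] == s[k]:
--             k += 1
--         pi.append(k)
--     return pi[-1]
--
--
-- def _overlap(p, t):
--     # largest k with p[:k] == t[-k:], via one prefix-function pass
--     return _pf_last(p + "\x00" + t)
--
--
-- def str_intersection_size(a, b):
--     if len(a) > len(b):
--         small, big = b, a
--     else:
--         small, big = a, b
--     if small in big:
--         return len(small)
--     k = max(_overlap(small, big), _overlap(big, small))
--     return k if k > len(small) // 2 else 0
-- ===== Notes on version B (the rewrite author's own statement) =====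
-- stated objective: faster
-- what changed: Replaced the O(n^2) countdown over spans with slice comparisons by two O(n+m) KMP prefix-function passes on small+sep+big and big+sep+small, taking the larger border and thresholding it at len(small)//2.
import Mathlib
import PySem

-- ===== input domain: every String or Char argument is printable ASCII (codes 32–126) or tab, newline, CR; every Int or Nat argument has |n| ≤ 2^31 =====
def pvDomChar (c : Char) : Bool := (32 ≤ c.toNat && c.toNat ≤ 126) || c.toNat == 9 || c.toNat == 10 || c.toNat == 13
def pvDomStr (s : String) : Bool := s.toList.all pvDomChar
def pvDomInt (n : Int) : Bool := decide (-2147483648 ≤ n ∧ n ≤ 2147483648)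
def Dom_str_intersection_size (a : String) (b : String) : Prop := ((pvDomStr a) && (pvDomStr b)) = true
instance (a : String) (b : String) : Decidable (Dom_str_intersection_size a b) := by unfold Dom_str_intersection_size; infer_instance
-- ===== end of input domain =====

-- B replaces A's O(n^2) countdown scan over overlap spans by two linear KMP prefix-function passes (faster, asymptotic).

-- ===== PORT A =====
-- the for-loop over range(len(small), len(small)//2, -1) with its two early returns
def aScan (small big : List Char) : List Int → Int
  | [] => 0
  | span :: rest =>
    if PySem.List.slice small none (some span) = PySem.List.slice big (some (-span)) none then span
    else if PySem.List.slice small (some (-span)) none = PySem.List.slice big none (some span) then span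
    else aScan small big rest

def str_intersection_size (a : String) (b : String) : Int :=
  let al := a.toList
  let bl := b.toList
  let small := if al.length > bl.length then bl else al
  let big := if al.length > bl.length then al else bl
  if PySem.Chars.isIn small big then (small.length : Int)
  else aScan small big
    (PySem.List.pyRange (small.length : Int) (PySem.Int.floordiv (small.length : Int) 2) (-1))

-- ===== PORT B =====
def pvSep : Char := Char.ofNat 0   -- the '\x00' separator of Source B

-- the inner `while k > 0 and s[i] != s[k]: k = pi[k-1]`; fuel = initial k suffices since k strictly decreases
def pfWhile (s : List Char) (pi : List Nat) (c : Char) : Nat → Nat → Nat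
  | 0, k => k
  | fuel + 1, k =>
    if 0 < k ∧ ¬ (c = s.getD k pvSep) then pfWhile s pi c fuel (pi.getD (k - 1) 0) else k

-- `for i in range(1, n): … pi.append(k)`; rem counts the remaining iterations
def pfGo (s : List Char) : Nat → Nat → List Nat → List Nat
  | _, 0, pi => pi
  | i, rem + 1, pi =>
    let k0 := pi.getD (i - 1) 0
    let k1 := pfWhile s pi (s.getD i pvSep) k0 k0
    let k2 := if s.getD i pvSep = s.getD k1 pvSep then k1 + 1 else k1
    pfGo s (i + 1) rem (pi ++ [k2])

def pfLast (s : List Char) : Nat :=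
  if s.length = 0 then 0 else (pfGo s 1 (s.length - 1) [0]).getLastD 0

def pvOverlap (p t : List Char) : Nat := pfLast (p ++ pvSep :: t)

def str_intersection_size_alt (a : String) (b : String) : Int :=
  let al := a.toList
  let bl := b.toList
  let small := if al.length > bl.length then bl else al
  let big := if al.length > bl.length then al else bl
  if PySem.Chars.isIn small big then (small.length : Int)
  else
    let k := max (pvOverlap small big) (pvOverlap big small)
    if small.length / 2 < k then (k : Int) else 0

-- ===== PRECONDITION & SPEC =====
def Spec_str_intersection_size (a : String) (b : String) (out : Int) : Prop := out = str_intersection_size_alt a b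
instance (a : String) (b : String) (out : Int) : Decidable (Spec_str_intersection_size a b out) := by unfold Spec_str_intersection_size; infer_instance

-- ===== CLAIM (what is proved, stated in full; the proofs are below) =====
def Claim_equal_str_intersection_size : Prop := ∀ (a : String) (b : String), Dom_str_intersection_size a b → Spec_str_intersection_size a b (str_intersection_size a b)

-- ===== LEMMAS AND PROOFS =====

-- k is a (proper) border length of w
abbrev BordP (w : List Char) (k : Nat) : Prop := k < w.length ∧ w.take k = w.drop (w.length - k)

-- the longest proper border length of w
def maxBord (w : List Char) : Nat := Nat.findGreatest (fun k => BordP w k) (w.length - 1)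

lemma bord_le_maxBord {w : List Char} {j : Nat} (h : BordP w j) : j ≤ maxBord w := by
  have : j ≤ w.length - 1 := by have := h.1; omega
  exact Nat.le_findGreatest this h

lemma maxBord_bord {w : List Char} (h : maxBord w ≠ 0) : BordP w (maxBord w) := by
  exact (Nat.findGreatest_eq_iff.1 (rfl : maxBord w = _)).2.1 h

lemma maxBord_le (w : List Char) : maxBord w ≤ w.length - 1 := by
  exact Nat.findGreatest_le _

-- extending a border by one character
lemma bord_succ_iff (t : List Char) (c : Char) (k : Nat) :
    BordP (t ++ [c]) (k + 1) ↔ (BordP t k ∧ t.getD k pvSep = c) := by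
  constructor
  · rintro ⟨hlt, heq⟩
    have hk : k < t.length := by simp [List.length_append] at hlt; omega
    simp only [List.length_append, List.length_cons, List.length_nil] at heq
    have e1 : (t ++ [c]).take (k + 1) = t.take k ++ [t[k]] := by
      rw [List.take_append_of_le_length (by omega), List.take_add_one]
      simp [List.getElem?_eq_getElem hk]
    have e2 : (t ++ [c]).drop (t.length + 1 - (k + 1)) = t.drop (t.length - k) ++ [c] := by
      have : t.length + 1 - (k + 1) = t.length - k := by omega
      rw [this, List.drop_append_of_le_length (by omega)]
    have e2' : t.length + 0 + 1 - (k + 1) = t.length + 1 - (k + 1) := by omega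
    rw [e2'] at heq
    rw [e1, e2] at heq
    obtain ⟨ha, hb⟩ := List.append_inj heq
      (by simp only [List.length_take, List.length_drop]; omega)
    refine ⟨⟨hk, ha⟩, ?_⟩
    simp at hb
    rw [List.getD_eq_getElem t pvSep hk, hb]
  · rintro ⟨⟨hk, he⟩, hc⟩
    refine ⟨by simp only [List.length_append, List.length_cons, List.length_nil]; omega, ?_⟩
    have e1 : (t ++ [c]).take (k + 1) = t.take k ++ [t[k]] := by
      rw [List.take_append_of_le_length (by omega), List.take_add_one]
      simp [List.getElem?_eq_getElem hk]
    have e2 : (t ++ [c]).drop ((t ++ [c]).length - (k + 1)) = t.drop (t.length - k) ++ [c] := by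
      have : (t ++ [c]).length - (k + 1) = t.length - k := by
        simp only [List.length_append, List.length_cons, List.length_nil]; omega
      rw [this, List.drop_append_of_le_length (by omega)]
    rw [e1, e2, he]
    congr 1
    simp only [List.getD_eq_getElem t pvSep hk] at hc
    simp [hc]

lemma bord_zero {t : List Char} (h : 0 < t.length) : BordP t 0 := by
  exact ⟨h, by simp⟩

-- a border of a border (as a prefix) is a border
lemma bord_trans {t : List Char} {k j : Nat} (h1 : BordP t k) (h2 : BordP (t.take k) j) :
    BordP t j := by
  obtain ⟨hk, e1⟩ := h1
  obtain ⟨hj, e2⟩ := h2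
  have hjk : j < k := by simp [List.length_take] at hj; omega
  refine ⟨by omega, ?_⟩
  have l2 : (t.take k).length - j = k - j := by simp [List.length_take]; omega
  rw [l2] at e2
  calc t.take j = (t.take k).take j := by rw [List.take_take]; congr 1; omega
    _ = (t.take k).drop (k - j) := e2
    _ = (t.drop (t.length - k)).drop (k - j) := by rw [e1]
    _ = t.drop (t.length - j) := by rw [List.drop_drop]; congr 1; omega

-- a shorter border is a border of a longer border
lemma bord_of_lt {t : List Char} {k j : Nat} (h1 : BordP t k) (hj : BordP t j) (hjk : j < k) :
    BordP (t.take k) j := by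
  obtain ⟨hk, e1⟩ := h1
  obtain ⟨hjlen, e2⟩ := hj
  refine ⟨by simp [List.length_take]; omega, ?_⟩
  have l2 : (t.take k).length - j = k - j := by simp [List.length_take]; omega
  rw [l2]
  calc (t.take k).take j = t.take j := by rw [List.take_take]; congr 1; omega
    _ = t.drop (t.length - j) := e2
    _ = (t.drop (t.length - k)).drop (k - j) := by rw [List.drop_drop]; congr 1; omega
    _ = (t.take k).drop (k - j) := by rw [e1]

-- reading a character of s.take i is reading it in s
lemma getD_take_eq {s : List Char} {i k : Nat} (hk : k < i) (hin : i ≤ s.length) :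
    (s.take i).getD k pvSep = s.getD k pvSep := by
  have hks : k < s.length := lt_of_lt_of_le hk hin
  rw [List.getD_eq_getElem _ _ (by simp [List.length_take]; omega),
      List.getD_eq_getElem _ _ hks]
  simp [List.getElem_take]

-- exit of the KMP inner loop: the candidate k matches (or is 0), every border of t++[c] is ≤ k+1
lemma pfExit_spec {s : List Char} {i k : Nat} {c : Char} (hi0 : 0 < i) (hin : i < s.length)
    (hk : k < i) (hchain : k = 0 ∨ BordP (s.take i) k)
    (hexit : k = 0 ∨ c = s.getD k pvSep)
    (hub : ∀ j, BordP (s.take i ++ [c]) j → j ≤ k + 1) :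
    (if c = s.getD k pvSep then k + 1 else k) = maxBord (s.take i ++ [c]) := by
  have hti : (s.take i).length = i := by simp [List.length_take]; omega
  by_cases hc : c = s.getD k pvSep
  · rw [if_pos hc]
    have hbt : BordP (s.take i) k := by
      rcases hchain with rfl | hb
      · exact bord_zero (by omega)
      · exact hb
    have hbw : BordP (s.take i ++ [c]) (k + 1) := by
      rw [bord_succ_iff]
      exact ⟨hbt, by rw [getD_take_eq hk (le_of_lt hin)]; exact hc.symm⟩
    refine le_antisymm (bord_le_maxBord hbw) ?_
    by_cases h0 : maxBord (s.take i ++ [c]) = 0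
    · omega
    · exact hub _ (maxBord_bord h0)
  · rw [if_neg hc]
    have hk0 : k = 0 := hexit.resolve_right hc
    subst hk0
    by_contra hne
    have h0 : maxBord (s.take i ++ [c]) ≠ 0 := fun h => hne h.symm
    have hbw := maxBord_bord h0
    have h1 : maxBord (s.take i ++ [c]) ≤ 1 := hub _ hbw
    have heq1 : maxBord (s.take i ++ [c]) = 1 := by omega
    rw [heq1] at hbw
    have := (bord_succ_iff (s.take i) c 0).1 hbw
    exact hc (by rw [← getD_take_eq hi0 (le_of_lt hin)]; exact this.2.symm)

lemma pfWhile_spec {s : List Char} {pi : List Nat} {i : Nat} {c : Char}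
    (hpi : ∀ j, j < i → pi.getD j 0 = maxBord (s.take (j + 1)))
    (hi0 : 0 < i) (hin : i < s.length) :
    ∀ fuel k, k ≤ fuel → k < i → (k = 0 ∨ BordP (s.take i) k) →
      (∀ j, BordP (s.take i ++ [c]) j → j ≤ k + 1) →
      (if c = s.getD (pfWhile s pi c fuel k) pvSep then pfWhile s pi c fuel k + 1
       else pfWhile s pi c fuel k) = maxBord (s.take i ++ [c]) := by
  intro fuel
  induction fuel with
  | zero =>
    intro k hkf hki hchain hub
    interval_cases k
    simp only [pfWhile]
    exact pfExit_spec hi0 hin hki (Or.inl rfl) (Or.inl rfl) hub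
  | succ fuel ih =>
    intro k hkf hki hchain hub
    by_cases hcond : 0 < k ∧ ¬ (c = s.getD k pvSep)
    · have hw : pfWhile s pi c (fuel + 1) k = pfWhile s pi c fuel (pi.getD (k - 1) 0) := by
        simp only [pfWhile, if_pos hcond]
      rw [hw]
      have hks : k ≤ s.length := by omega
      have hbtk : BordP (s.take i) k :=
        hchain.resolve_left (by omega)
      have hkv : pi.getD (k - 1) 0 = maxBord (s.take k) := by
        have := hpi (k - 1) (by omega)
        rwa [Nat.sub_add_cancel (by omega)] at this
      have htk : (s.take k).length = k := by simp [List.length_take]; omega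
      have hk'le : pi.getD (k - 1) 0 ≤ k - 1 := by
        rw [hkv]; have := maxBord_le (s.take k); omega
      have htake : s.take k = (s.take i).take k := by
        rw [List.take_take]; congr 1; omega
      refine ih (pi.getD (k - 1) 0) (by omega) (by omega) ?_ ?_
      · by_cases h0 : pi.getD (k - 1) 0 = 0
        · exact Or.inl h0
        · refine Or.inr ?_
          have hbk' : BordP (s.take k) (pi.getD (k - 1) 0) := by
            rw [hkv]; exact maxBord_bord (by rwa [← hkv])
          rw [htake] at hbk'
          exact bord_trans hbtk hbk'
      · intro j hj
        have hjk : j ≤ k + 1 := hub j hj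
        rcases Nat.eq_zero_or_pos j with rfl | hj0
        · omega
        · obtain ⟨m, rfl⟩ : ∃ m, j = m + 1 := ⟨j - 1, by omega⟩
          have hm := (bord_succ_iff (s.take i) c m).1 hj
          have hmk : m < k := by
            rcases Nat.lt_or_ge m k with h | h
            · exact h
            · exfalso
              have hmk' : m = k := by omega
              subst hmk'
              exact hcond.2 (by rw [← getD_take_eq hki (le_of_lt hin)]; exact hm.2.symm)
          have hbm : BordP ((s.take i).take k) m := bord_of_lt hbtk hm.1 hmk
          rw [← htake] at hbm
          have : m ≤ maxBord (s.take k) := by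
            have htkk : m < (s.take k).length := by rw [htk]; omega
            exact bord_le_maxBord (by rw [htake]; exact bord_of_lt hbtk hm.1 hmk)
          omega
    · have hw : pfWhile s pi c (fuel + 1) k = k := by
        simp only [pfWhile, if_neg hcond]
      rw [hw]
      have hexit : k = 0 ∨ c = s.getD k pvSep := by
        by_cases h0 : k = 0
        · exact Or.inl h0
        · exact Or.inr (by_contra fun hne => hcond ⟨by omega, hne⟩)
      exact pfExit_spec hi0 hin hki hchain hexit hub

lemma pfGo_spec {s : List Char} :
    ∀ rem i pi, 0 < i → i + rem = s.length → pi.length = i →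
      (∀ j, j < i → pi.getD j 0 = maxBord (s.take (j + 1))) →
      (pfGo s i rem pi).length = s.length ∧
        ∀ j, j < s.length → (pfGo s i rem pi).getD j 0 = maxBord (s.take (j + 1)) := by
  intro rem
  induction rem with
  | zero =>
    intro i pi hi0 hilen hlen hpi
    simp only [pfGo]
    exact ⟨by omega, fun j hj => hpi j (by omega)⟩
  | succ rem ih =>
    intro i pi hi0 hilen hlen hpi
    have hin : i < s.length := by omega
    have hti : (s.take i).length = i := by simp [List.length_take]; omega
    have hk0 : pi.getD (i - 1) 0 = maxBord (s.take i) := by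
      have := hpi (i - 1) (by omega)
      rwa [Nat.sub_add_cancel (by omega)] at this
    have hk0lt : pi.getD (i - 1) 0 < i := by
      rw [hk0]; have := maxBord_le (s.take i); omega
    have hchain : pi.getD (i - 1) 0 = 0 ∨ BordP (s.take i) (pi.getD (i - 1) 0) := by
      by_cases h0 : pi.getD (i - 1) 0 = 0
      · exact Or.inl h0
      · right
        rw [hk0]
        exact maxBord_bord (by rw [← hk0]; exact h0)
    have hub : ∀ j, BordP (s.take i ++ [s.getD i pvSep]) j → j ≤ pi.getD (i - 1) 0 + 1 := by
      intro j hj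
      rcases Nat.eq_zero_or_pos j with rfl | hj0
      · omega
      · obtain ⟨m, rfl⟩ : ∃ m, j = m + 1 := ⟨j - 1, by omega⟩
        have hm := (bord_succ_iff (s.take i) (s.getD i pvSep) m).1 hj
        have := bord_le_maxBord hm.1
        rw [← hk0] at this
        omega
    have hmb := pfWhile_spec hpi hi0 hin (pi.getD (i - 1) 0) (pi.getD (i - 1) 0)
      le_rfl hk0lt hchain hub
    have hwsucc : s.take i ++ [s.getD i pvSep] = s.take (i + 1) := by
      rw [List.take_add_one]
      congr 1
      rw [List.getD_eq_getElem _ _ hin]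
      simp [List.getElem?_eq_getElem hin]
    rw [hwsucc] at hmb
    simp only [pfGo]
    apply ih (i + 1) _ (by omega) (by omega) (by simp [hlen])
    intro j hj
    rcases Nat.lt_or_ge j i with hlt | hge
    · rw [List.getD_append pi _ 0 j (by omega)]
      exact hpi j hlt
    · have hji : j = i := by omega
      subst hji
      rw [List.getD_append_right pi _ 0 j (by omega), hlen, Nat.sub_self]
      simpa using hmb

lemma pfLast_spec (s : List Char) : pfLast s = maxBord s := by
  by_cases h : s.length = 0
  · have : s = [] := List.eq_nil_of_length_eq_zero h
    subst this
    simp [pfLast, maxBord]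
  · have h1 : 0 < s.length := by omega
    have hinv : ∀ j, j < 1 → [0].getD j 0 = maxBord (s.take (j + 1)) := by
      intro j hj
      interval_cases j
      have hle := maxBord_le (s.take (0 + 1))
      have : (s.take (0 + 1)).length = 1 := by simp [List.length_take]; omega
      simp only [List.getD, List.getElem?_cons_zero, Option.getD_some]
      omega
    obtain ⟨hlen, hval⟩ := pfGo_spec (s.length - 1) 1 [0] (by omega) (by omega) rfl hinv
    have hne : pfGo s 1 (s.length - 1) [0] ≠ [] := by
      intro hnil; rw [hnil] at hlen; simp at hlen; omega
    rw [pfLast, if_neg h]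
    rw [List.getLastD_eq_getLast?, List.getLast?_eq_getElem?, ← List.getD_eq_getElem?_getD, hlen]
    have := hval (s.length - 1) (by omega)
    rw [this, Nat.sub_add_cancel (by omega), List.take_length]

-- k is a prefix-of-p = suffix-of-q overlap
abbrev OvP (p q : List Char) (k : Nat) : Prop :=
  k ≤ p.length ∧ k ≤ q.length ∧ p.take k = q.drop (q.length - k)

-- first-occurrence uniqueness of the separator
lemma sep_split_eq {u u' v v' : List Char} (hu : pvSep ∉ u) (hu' : pvSep ∉ u')
    (h : u ++ pvSep :: v = u' ++ pvSep :: v') : u.length = u'.length := by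
  induction u generalizing u' with
  | nil =>
    cases u' with
    | nil => rfl
    | cons a u'' =>
      simp only [List.nil_append, List.cons_append, List.cons.injEq] at h
      exact absurd (h.1 ▸ List.mem_cons_self) hu'
  | cons a u ih =>
    cases u' with
    | nil =>
      simp only [List.cons_append, List.nil_append, List.cons.injEq] at h
      exact absurd (h.1.symm ▸ List.mem_cons_self) hu
    | cons a' u'' =>
      simp only [List.cons_append, List.cons.injEq] at h
      have := ih (fun hm => hu (List.mem_cons_of_mem a hm))
        (fun hm => hu' (List.mem_cons_of_mem a' hm)) h.2
      simp [this]

-- with a fresh separator, borders of p ++ sep :: q are exactly the p/q overlaps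
lemma bord_sep_iff {p q : List Char} (hp : pvSep ∉ p) (hq : pvSep ∉ q) (k : Nat) :
    BordP (p ++ pvSep :: q) k ↔ OvP p q k := by
  have hL : (p ++ pvSep :: q).length = p.length + q.length + 1 := by
    simp [List.length_append]; omega
  have e_take_le : ∀ m, m ≤ p.length → (p ++ pvSep :: q).take m = p.take m := by
    intro m hm; exact List.take_append_of_le_length hm
  have e_drop_ge : ∀ m, m ≤ q.length →
      (p ++ pvSep :: q).drop ((p ++ pvSep :: q).length - m) = q.drop (q.length - m) := by
    intro m hm
    rw [hL]
    have harith : p.length + q.length + 1 - m = p.length + ((q.length - m) + 1) := by omega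
    rw [harith, List.drop_append]
    rw [List.drop_eq_nil_of_le (by omega), Nat.add_sub_cancel_left, List.drop_succ_cons,
      List.nil_append]
  constructor
  · rintro ⟨hk, he⟩
    rw [hL] at hk
    by_cases hkp : k ≤ p.length <;> by_cases hkq : k ≤ q.length
    · refine ⟨hkp, hkq, ?_⟩
      rw [← e_take_le k hkp, ← e_drop_ge k hkq]
      exact he
    · -- k > q.length, k ≤ p.length : the suffix contains the separator, the prefix does not
      exfalso
      have hdrop : (p ++ pvSep :: q).drop ((p ++ pvSep :: q).length - k)
          = p.drop ((p ++ pvSep :: q).length - k) ++ pvSep :: q :=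
        List.drop_append_of_le_length (by rw [hL]; omega)
      have hsep_in : pvSep ∈ (p ++ pvSep :: q).drop ((p ++ pvSep :: q).length - k) := by
        rw [hdrop]; exact List.mem_append_right _ List.mem_cons_self
      rw [← he, e_take_le k hkp] at hsep_in
      exact hp (List.take_subset _ _ hsep_in)
    · -- k > p.length, k ≤ q.length : the prefix contains the separator, the suffix does not
      exfalso
      have htake : (p ++ pvSep :: q).take k = p ++ (pvSep :: q).take (k - p.length) := by
        rw [List.take_append, List.take_of_length_le (by omega)]
      have hsep_in : pvSep ∈ (p ++ pvSep :: q).take k := by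
        rw [htake]
        refine List.mem_append_right _ ?_
        have h2 : k - p.length = (k - p.length - 1) + 1 := by omega
        rw [h2, List.take_succ_cons]
        exact List.mem_cons_self
      rw [he, e_drop_ge k hkq] at hsep_in
      exact hq (List.drop_subset _ _ hsep_in)
    · -- k beyond both : compare the position of the separator on the two sides
      exfalso
      have htake : (p ++ pvSep :: q).take k = p ++ pvSep :: q.take (k - p.length - 1) := by
        rw [List.take_append, List.take_of_length_le (by omega)]
        congr 1
        have h2 : k - p.length = (k - p.length - 1) + 1 := by omega
        rw [h2, List.take_succ_cons]
        simp
      have hdrop : (p ++ pvSep :: q).drop ((p ++ pvSep :: q).length - k)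
          = p.drop ((p ++ pvSep :: q).length - k) ++ pvSep :: q :=
        List.drop_append_of_le_length (by rw [hL]; omega)
      rw [htake, hdrop] at he
      have hlen := sep_split_eq hp (fun hm => hp (List.drop_subset _ _ hm)) he
      rw [List.length_drop, hL] at hlen
      omega
  · rintro ⟨hkp, hkq, he⟩
    refine ⟨by omega, ?_⟩
    rw [e_take_le k hkp, e_drop_ge k hkq]
    exact he

lemma pvOverlap_ub {p q : List Char} (hp : pvSep ∉ p) (hq : pvSep ∉ q) {j : Nat}
    (h : OvP p q j) : j ≤ pvOverlap p q := by
  rw [pvOverlap, pfLast_spec]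
  exact bord_le_maxBord ((bord_sep_iff hp hq j).2 h)

lemma pvOverlap_ov {p q : List Char} (hp : pvSep ∉ p) (hq : pvSep ∉ q)
    (h : pvOverlap p q ≠ 0) : OvP p q (pvOverlap p q) := by
  rw [pvOverlap, pfLast_spec] at h ⊢
  exact (bord_sep_iff hp hq _).1 (maxBord_bord h)

-- A's scan over the descending span list computes Nat.findGreatest
lemma aScan_ind (s t : List Char) (h : Nat) :
    ∀ d j, h + d = j →
      aScan s t ((List.range d).map (fun k => (j : Int) - (k : Nat))) =
        (Nat.findGreatest (fun m => h < m ∧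
          (PySem.List.slice s none (some (m : Int)) = PySem.List.slice t (some (-(m : Int))) none ∨
           PySem.List.slice s (some (-(m : Int))) none = PySem.List.slice t none (some (m : Int)))) j : Int) := by
  intro d
  induction d with
  | zero =>
    intro j hj
    have hjh : j = h := by omega
    subst hjh
    simp only [List.range_zero, List.map_nil, aScan]
    rw [Nat.findGreatest_eq_zero_iff.2 (fun m _ hmh hP => absurd hP.1 (by omega))]
    simp
  | succ d ih =>
    intro j hj
    have hj1 : 1 ≤ j := by omega
    rw [List.range_succ_eq_map]
    simp only [List.map_cons, List.map_map]
    have hmap : ((fun k : Nat => (j : Int) - (k : Nat)) ∘ Nat.succ) =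
        (fun k : Nat => ((j - 1 : Nat) : Int) - (k : Nat)) := by
      funext k
      simp only [Function.comp]
      omega
    rw [hmap]
    simp only [aScan, Nat.cast_zero, sub_zero]
    rw [ih (j - 1) (by omega)]
    have hsucc : j = (j - 1) + 1 := by omega
    by_cases hc1 : PySem.List.slice s none (some (j : Int)) =
        PySem.List.slice t (some (-(j : Int))) none
    · rw [if_pos hc1, Nat.findGreatest_eq ⟨by omega, Or.inl hc1⟩]
    · rw [if_neg hc1]
      by_cases hc2 : PySem.List.slice s (some (-(j : Int))) none =
          PySem.List.slice t none (some (j : Int))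
      · rw [if_pos hc2, Nat.findGreatest_eq ⟨by omega, Or.inr hc2⟩]
      · rw [if_neg hc2]
        conv_rhs => rw [hsucc]
        rw [Nat.findGreatest_of_not (by
          rw [← hsucc]
          rintro ⟨-, hor⟩
          rcases hor with h1 | h2
          · exact hc1 h1
          · exact hc2 h2)]

-- the two ports agree after the small/big selection
lemma core_eq (s t : List Char) (hst : s.length ≤ t.length)
    (hs : pvSep ∉ s) (ht : pvSep ∉ t) :
    (if PySem.Chars.isIn s t then (s.length : Int)
     else aScan s t (PySem.List.pyRange (s.length : Int) (PySem.Int.floordiv (s.length : Int) 2) (-1))) =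
    (if PySem.Chars.isIn s t then (s.length : Int)
     else if s.length / 2 < max (pvOverlap s t) (pvOverlap t s) then
       ((max (pvOverlap s t) (pvOverlap t s) : Nat) : Int) else 0) := by
  by_cases hc : PySem.Chars.isIn s t
  · rw [if_pos hc, if_pos hc]
  · rw [if_neg hc, if_neg hc]
    have hflo : PySem.Int.floordiv (s.length : Int) 2 = ((s.length / 2 : Nat) : Int) := by
      exact_mod_cast PySem.Int.floordiv_natCast s.length 2
    rw [hflo, PySem.List.pyRange_neg_one]
    have htn : (((s.length : Int)) - ((s.length / 2 : Nat) : Int)).toNat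
        = s.length - s.length / 2 := by omega
    rw [htn, aScan_ind s t (s.length / 2) (s.length - s.length / 2) s.length (by omega)]
    -- from here on a pure Nat computation
    have hOv1 : ∀ m : Nat, 0 < m → m ≤ s.length →
        ((PySem.List.slice s none (some (m : Int)) = PySem.List.slice t (some (-(m : Int))) none)
          ↔ OvP s t m) := by
      intro m hm0 hmn
      rw [PySem.List.slice_to_natCast, PySem.List.slice_from_neg_natCast t m hm0]
      constructor
      · intro he; exact ⟨hmn, by omega, he⟩
      · intro hov; exact hov.2.2
    have hOv2 : ∀ m : Nat, 0 < m → m ≤ s.length →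
        ((PySem.List.slice s (some (-(m : Int))) none = PySem.List.slice t none (some (m : Int)))
          ↔ OvP t s m) := by
      intro m hm0 hmn
      rw [PySem.List.slice_to_natCast, PySem.List.slice_from_neg_natCast s m hm0]
      constructor
      · intro he; exact ⟨by omega, hmn, he.symm⟩
      · intro hov; exact hov.2.2.symm
    by_cases hK : s.length / 2 < max (pvOverlap s t) (pvOverlap t s)
    · rw [if_pos hK]
      have hK0 : max (pvOverlap s t) (pvOverlap t s) ≠ 0 := by omega
      have hKn : max (pvOverlap s t) (pvOverlap t s) ≤ s.length := by
        rcases max_choice (pvOverlap s t) (pvOverlap t s) with hm | hm <;> rw [hm]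
        · exact ((pvOverlap_ov hs ht (by omega)).1)
        · exact ((pvOverlap_ov ht hs (by omega)).2.1)
      have hKpos : 0 < max (pvOverlap s t) (pvOverlap t s) := by omega
      congr 1
      rw [Nat.findGreatest_eq_iff]
      refine ⟨hKn, fun _ => ⟨hK, ?_⟩, fun m hKm hmn hP => ?_⟩
      · rcases max_choice (pvOverlap s t) (pvOverlap t s) with hm | hm <;> rw [hm]
        · exact Or.inl ((hOv1 _ (by omega) (by omega)).2 (hm ▸ pvOverlap_ov hs ht (by omega)))
        · exact Or.inr ((hOv2 _ (by omega) (by omega)).2 (hm ▸ pvOverlap_ov ht hs (by omega)))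
      · rcases hP.2 with h1 | h2
        · have := pvOverlap_ub hs ht ((hOv1 m (by omega) hmn).1 h1)
          omega
        · have := pvOverlap_ub ht hs ((hOv2 m (by omega) hmn).1 h2)
          omega
    · rw [if_neg hK]
      rw [Nat.findGreatest_eq_zero_iff.2 (fun m hm0 hmn hP => ?_)]
      · simp
      · rcases hP.2 with h1 | h2
        · have := pvOverlap_ub hs ht ((hOv1 m (by omega) hmn).1 h1)
          omega
        · have := pvOverlap_ub ht hs ((hOv2 m (by omega) hmn).1 h2)
          omega

-- ===== VERDICT (by name: the statement is the Claim_ definition above) =====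
lemma sep_not_mem {x : String} (h : pvDomStr x = true) : pvSep ∉ x.toList := by
  intro hm
  have := List.all_eq_true.1 h _ hm
  exact absurd this (by decide)

theorem str_intersection_size_spec : Claim_equal_str_intersection_size := by
  intro a b hdom
  unfold Spec_str_intersection_size
  unfold Dom_str_intersection_size at hdom
  rw [Bool.and_eq_true] at hdom
  have hsa : pvSep ∉ a.toList := sep_not_mem hdom.1
  have hsb : pvSep ∉ b.toList := sep_not_mem hdom.2
  simp only [str_intersection_size, str_intersection_size_alt]
  by_cases hab : a.toList.length > b.toList.length
  · simp only [if_pos hab]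
    exact core_eq b.toList a.toList (by omega) hsb hsa
  · simp only [if_neg hab]
    exact core_eq a.toList b.toList (by omega) hsa hsb
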